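-- pv_equiv track=rewrite | github.com/self-study-squad/Python-examples | String/Exercise-42.py | diccount
-- ===== SOURCE A (Python) =====
-- def diccount(strip):
--     dictproc= {}
--     for i in strip:
--         if i not in dictproc:
--             dictproc[i] = 1
--         else:
--             dictproc[i] += 1
--     result = {}
--     for i in dictproc:
--         if dictproc[i] != 1:
--             result[i] = dictproc[i]
--     return result
-- ===== SOURCE B (Python) =====
-- def diccount(strip):
--     # one loop over the distinct characters (first-appearance order),
--     # letting str.count do the counting; no counting dict, no filter pass
--     result = {}
--     for c in dict.fromkeys(strip):
--         n = strip.count(c)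
--         if n > 1:
--             result[c] = n
--     return result
-- ===== Notes on version B (the rewrite author's own statement) =====
-- stated objective: simpler
-- what changed: Instead of building a count dict in one pass and filtering it in a second, B iterates once over the distinct characters (dict.fromkeys order = first appearance) and keeps c with strip.count(c) when that count exceeds 1.
import Mathlib
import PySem

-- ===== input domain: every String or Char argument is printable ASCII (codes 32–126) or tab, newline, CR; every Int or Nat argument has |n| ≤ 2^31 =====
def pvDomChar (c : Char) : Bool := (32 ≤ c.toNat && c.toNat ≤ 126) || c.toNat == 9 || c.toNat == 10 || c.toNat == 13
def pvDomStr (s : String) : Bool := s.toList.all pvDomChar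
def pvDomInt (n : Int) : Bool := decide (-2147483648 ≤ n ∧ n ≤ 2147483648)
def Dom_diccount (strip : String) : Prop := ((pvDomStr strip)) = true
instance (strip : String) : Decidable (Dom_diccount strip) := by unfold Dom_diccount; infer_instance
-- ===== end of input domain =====

-- B replaces A's count-then-filter two-dict pipeline by one loop over the distinct
-- characters keeping those whose count in the string exceeds 1 (objective: simpler).


-- ===== PORT A =====
-- Python dict keys are the 1-char strings of the input; key of a char c is String.ofList [c].
def diccount (strip : String) : List (String × Int) :=
  let dictproc : PySem.Dict String Int :=
    strip.toList.foldl (fun d i =>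
      if d.contains (String.ofList [i]) = false then
        d.insert (String.ofList [i]) 1
      else
        d.insert (String.ofList [i]) (d.getD (String.ofList [i]) 0 + 1)) PySem.Dict.empty
  let result : PySem.Dict String Int :=
    dictproc.keys.foldl (fun r i =>
      if dictproc.getD i 0 ≠ 1 then r.insert i (dictproc.getD i 0) else r) PySem.Dict.empty
  result.items

-- ===== PORT B =====
-- dict.fromkeys(strip) → PySem.List.dedup; strip.count(c) for a single character c is
-- exactly the character count strip.toList.count c.
def diccount_alt (strip : String) : List (String × Int) :=
  let result : PySem.Dict String Int :=
    (PySem.List.dedup strip.toList).foldl (fun r c =>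
      let n : Int := strip.toList.count c
      if n > 1 then r.insert (String.ofList [c]) n else r) PySem.Dict.empty
  result.items

-- ===== PRECONDITION & SPEC =====
def Spec_diccount (strip : String) (out : List (String × Int)) : Prop := out = diccount_alt strip
instance (strip : String) (out : List (String × Int)) : Decidable (Spec_diccount strip out) := by unfold Spec_diccount; infer_instance

-- ===== CLAIM (what is proved, stated in full; the proofs are below) =====
def Claim_equal_diccount : Prop := ∀ (strip : String), Dom_diccount strip → Spec_diccount strip (diccount strip)

-- ===== LEMMAS AND PROOFS =====

-- A's first loop with branches merged: on an unseen key getD is 0, so 'insert 1' is 'insert getD+1'.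
theorem foldA_eq_counter_fold {α κ : Type} [BEq κ] [LawfulBEq κ] (key : α → κ)
    (l : List α) (d : PySem.Dict κ Int) :
    l.foldl (fun d x =>
      if d.contains (key x) = false then d.insert (key x) 1
      else d.insert (key x) (d.getD (key x) 0 + 1)) d
    = l.foldl (fun d x => d.insert (key x) (d.getD (key x) 0 + 1)) d := by
  induction l generalizing d with
  | nil => rfl
  | cons a t ih =>
    simp only [List.foldl_cons]
    by_cases h : d.contains (key a) = false
    · rw [if_pos h, PySem.Dict.getD_of_not_contains d 0 h]
      exact ih _
    · rw [if_neg h]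
      exact ih _

-- A 'for k: if P k: r[key k] = v k' loop over fresh distinct keys appends the filtered pairs.
theorem foldl_insert_filter {α κ : Type} [BEq κ] [LawfulBEq κ]
    (key : α → κ) (v : α → Int) (P : α → Prop) [DecidablePred P] :
    ∀ (ks : List α) (d : PySem.Dict κ Int), (ks.map key).Nodup →
      (∀ k ∈ ks, d.contains (key k) = false) →
      (ks.foldl (fun r c => if P c then r.insert (key c) (v c) else r) d).items
        = d.items ++ (ks.filter (fun c => decide (P c))).map (fun c => (key c, v c)) := by
  intro ks
  induction ks with
  | nil => intro d _ _; simp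
  | cons a t ih =>
    intro d hnd hfresh
    simp only [List.map_cons, List.nodup_cons] at hnd
    by_cases hP : P a
    · have hca : d.contains (key a) = false := hfresh a (by simp)
      have hfresh' : ∀ k ∈ t, (d.insert (key a) (v a)).contains (key k) = false := by
        intro k hk
        rw [PySem.Dict.contains_insert]
        have hne : key k ≠ key a := by
          intro h; exact hnd.1 (h ▸ List.mem_map_of_mem hk)
        simp [hne, hfresh k (List.mem_cons_of_mem _ hk)]
      simp only [List.foldl_cons, if_pos hP]
      rw [ih _ hnd.2 hfresh', PySem.Dict.items_insert_of_not_contains d (v a) hca]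
      simp [hP]
    · simp only [List.foldl_cons, if_neg hP]
      rw [ih _ hnd.2 (fun k hk => hfresh k (List.mem_cons_of_mem _ hk))]
      simp [hP]

-- PySem.Set.ofList commutes with an injective map.
theorem ofList_map_of_injective {α β : Type} [BEq α] [LawfulBEq α] [BEq β] [LawfulBEq β]
    (f : α → β) (hf : Function.Injective f) (xs : List α) :
    PySem.Set.ofList (xs.map f) = (PySem.Set.ofList xs).map f := by
  have key : ∀ (xs : List α) (s : List α),
      (xs.map f).foldl PySem.Set.add (s.map f) = (xs.foldl PySem.Set.add s).map f := by
    intro xs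
    induction xs with
    | nil => intro s; rfl
    | cons a t ih =>
      intro s
      have hc : PySem.Set.contains (s.map f) (f a) = PySem.Set.contains s a := by
        by_cases hm : a ∈ s
        · have : f a ∈ s.map f := List.mem_map_of_mem hm
          simp [PySem.Set.contains, hm, this]
        · have : f a ∉ s.map f := by
            intro h
            obtain ⟨x, hx, hfx⟩ := List.mem_map.mp h
            exact hm (hf hfx ▸ hx)
          simp [PySem.Set.contains, hm, this]
      simp only [List.map_cons, List.foldl_cons, PySem.Set.add, hc]
      by_cases hs : PySem.Set.contains s a = true
      · rw [if_pos hs, if_pos hs]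
        exact ih s
      · rw [if_neg hs, if_neg hs, show s.map f ++ [f a] = (s ++ [a]).map f by simp]
        exact ih (s ++ [a])
  simpa [PySem.Set.ofList, PySem.Set.empty] using key xs []

theorem key_injective : Function.Injective (fun c : Char => String.ofList [c]) := by
  intro a b h
  have : ([a] : List Char) = [b] := by
    simpa using congrArg String.toList h
  simpa using this

-- ===== VERDICT (by name: the statement is the Claim_ definition above) =====
theorem diccount_spec : Claim_equal_diccount := by
  intro strip _
  unfold Spec_diccount diccount diccount_alt
  -- A's first loop builds Counter of the 1-char-string keys
  have h1 : strip.toList.foldl (fun d i =>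
        if d.contains (String.ofList [i]) = false then d.insert (String.ofList [i]) 1
        else d.insert (String.ofList [i]) (d.getD (String.ofList [i]) 0 + 1)) PySem.Dict.empty
      = PySem.Dict.counter (strip.toList.map (fun c => String.ofList [c])) := by
    rw [← PySem.Dict.foldl_insert_getD_add_one_eq_counter, List.foldl_map,
        foldA_eq_counter_fold (fun c : Char => String.ofList [c])]
  rw [h1]
  -- both second loops run over fresh distinct keys, so their items are the filtered pairs
  have hA := foldl_insert_filter (α := String) (key := id)
      (v := fun k => (PySem.Dict.counter (strip.toList.map (fun c => String.ofList [c]))).getD k 0)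
      (P := fun k => (PySem.Dict.counter (strip.toList.map (fun c => String.ofList [c]))).getD k 0 ≠ 1)
      (PySem.Dict.counter (strip.toList.map (fun c => String.ofList [c]))).keys PySem.Dict.empty
      (by simp)
      (by intro k _; simp [PySem.Dict.contains_empty])
  have hB := foldl_insert_filter (α := Char) (key := fun c => String.ofList [c])
      (v := fun c => (strip.toList.count c : Int))
      (P := fun c => (strip.toList.count c : Int) > 1)
      (PySem.List.dedup strip.toList) PySem.Dict.empty
      ((PySem.List.nodup_dedup strip.toList).map key_injective)
      (by intro k _; simp [PySem.Dict.contains_empty])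
  simp only [id_eq] at hA
  rw [hA, hB, show (PySem.Dict.empty : PySem.Dict String Int).items = [] from rfl,
      List.nil_append, List.nil_append]
  -- keys of the counter = the 1-char-string image of dedup
  have hkeys : (PySem.Dict.counter (strip.toList.map (fun c => String.ofList [c]))).keys
      = (PySem.List.dedup strip.toList).map (fun c => String.ofList [c]) := by
    rw [PySem.Dict.keys_counter, ofList_map_of_injective _ key_injective]
    rfl
  rw [hkeys, List.filter_map, List.map_map]
  -- pointwise on dedup: the counts agree and (≠ 1 ↔ > 1) since every member has count ≥ 1
  have hcount : ∀ c ∈ PySem.List.dedup strip.toList,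
      (PySem.Dict.counter (strip.toList.map (fun c => String.ofList [c]))).getD (String.ofList [c]) 0
        = (strip.toList.count c : Int) := by
    intro c _
    rw [PySem.Dict.getD_counter,
        List.count_map_of_injective _ (fun c : Char => String.ofList [c]) key_injective]
  have hfil : (PySem.List.dedup strip.toList).filter
        ((fun k => decide ((PySem.Dict.counter (strip.toList.map (fun c => String.ofList [c]))).getD k 0 ≠ 1))
          ∘ (fun c => String.ofList [c]))
      = (PySem.List.dedup strip.toList).filter (fun c => decide ((strip.toList.count c : Int) > 1)) := by
    apply List.filter_congr
    intro c hc
    have h1c : 1 ≤ strip.toList.count c :=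
      List.one_le_count_iff.mpr ((PySem.List.mem_dedup strip.toList c).mp hc)
    simp only [Function.comp, hcount c hc]
    have hiff : ((strip.toList.count c : Int) ≠ 1) ↔ ((strip.toList.count c : Int) > 1) := by omega
    simp [hiff]
  rw [hfil]
  apply List.map_congr_left
  intro c hc
  have hc' : c ∈ PySem.List.dedup strip.toList := List.mem_of_mem_filter hc
  simp [Function.comp, hcount c hc']
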